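-- pv_equiv track=rewrite | github.com/hogiljung/Algorithms | 프로그래머스/lv0/120869. 외계어 사전/외계어 사전.py | solution
-- ===== SOURCE A (Python) =====
-- def solution(spell, dic):
--     answer = 2
--
--     for word in dic:
--         know = condition = True
--         word_list = list(word)
--         word_set = set(word)
--         for spelling in word_set:
--             word_list.remove(spelling)
--
--         for spelling in word_list:
--             if spelling in word_set:
--                 condition = False
--                 break
--
--         if not condition:
--             continue
--
--         for s in spell:
--             if s not in word_set:
--                 know = False
--                 break
--
--         if know:
--             answer = 1
--             break
--
--     return answer
-- ===== SOURCE B (Python) =====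
-- def solution(spell, dic):
--     need = set(spell)
--     for word in dic:
--         letters = set(word)
--         if len(word) == len(letters) and need <= letters:
--             return 1
--     return 2
-- ===== Notes on version B (the rewrite author's own statement) =====
-- stated objective: simpler
-- what changed: Replaces A's list-copy / per-char remove() / leftover-rescan duplicate detection and the manual membership loop with two set predicates (len(word)==len(set(word)) and set(spell)<=set(word)) and an early return.
import Mathlib
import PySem

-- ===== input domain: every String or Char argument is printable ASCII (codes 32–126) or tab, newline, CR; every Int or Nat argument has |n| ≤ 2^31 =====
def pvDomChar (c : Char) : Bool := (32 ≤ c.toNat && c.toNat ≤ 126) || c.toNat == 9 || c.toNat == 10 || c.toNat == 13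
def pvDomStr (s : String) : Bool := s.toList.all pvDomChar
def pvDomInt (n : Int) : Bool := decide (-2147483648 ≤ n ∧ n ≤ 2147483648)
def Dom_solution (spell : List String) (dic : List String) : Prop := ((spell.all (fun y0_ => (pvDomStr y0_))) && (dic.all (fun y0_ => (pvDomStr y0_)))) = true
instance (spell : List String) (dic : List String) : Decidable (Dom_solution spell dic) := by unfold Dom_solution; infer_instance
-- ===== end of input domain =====

-- B replaces A's list-copy / per-char remove() / leftover-rescan duplicate check and manual
-- membership loop by two set predicates (len(word)==len(set(word)), set(spell)<=set(word)); simpler.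


-- ===== PORT A =====
-- a Python str iterates as 1-character strings: list(word) / the elements fed to set(word)
def pvChars (w : String) : List String := w.toList.map (fun c => String.mk [c])

-- 'for spelling in word_list: if spelling in word_set: condition = False; break'
def pvCondLoop (wl : List String) (wset : PySem.Set String) : Bool :=
  match wl with
  | [] => true
  | s :: rest => if s ∈ wset then false else pvCondLoop rest wset

-- 'for s in spell: if s not in word_set: know = False; break'
def pvKnowLoop (sp : List String) (wset : PySem.Set String) : Bool :=
  match sp with
  | [] => true
  | s :: rest => if s ∈ wset then pvKnowLoop rest wset else false

def pvSolLoop (spell : List String) : List String → Int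
  | [] => 2
  | word :: rest =>
    let wordList := pvChars word
    let wordSet : PySem.Set String := PySem.Set.ofList (pvChars word)
    -- 'for spelling in word_set: word_list.remove(spelling)' — the resulting list does not depend on
    -- the set's iteration order (one first occurrence of each distinct char is removed), so folding in
    -- the Set's stored order is exact; remove() never raises here (each element of the set occurs in
    -- the list), the .getD branch is unreachable
    let wordList := wordSet.foldl (fun acc s => (PySem.List.remove? acc s).getD acc) wordList
    let condition := pvCondLoop wordList wordSet
    if condition then
      if pvKnowLoop spell wordSet then 1 else pvSolLoop spell rest
    else pvSolLoop spell rest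

def solution (spell : List String) (dic : List String) : Int := pvSolLoop spell dic

-- ===== PORT B =====
def pvAltLoop (need : PySem.Set String) : List String → Int
  | [] => 2
  | word :: rest =>
    let letters : PySem.Set String := PySem.Set.ofList (pvChars word)
    if PySem.Str.len word == PySem.Set.len letters && PySem.Set.issubset need letters then 1
    else pvAltLoop need rest

def solution_alt (spell : List String) (dic : List String) : Int :=
  pvAltLoop (PySem.Set.ofList spell) dic

-- ===== PRECONDITION & SPEC =====
def Spec_solution (spell : List String) (dic : List String) (out : Int) : Prop := out = solution_alt spell dic
instance (spell : List String) (dic : List String) (out : Int) : Decidable (Spec_solution spell dic out) := by unfold Spec_solution; infer_instance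

-- ===== CLAIM (what is proved, stated in full; the proofs are below) =====
def Claim_equal_solution : Prop := ∀ (spell : List String) (dic : List String), Dom_solution spell dic → Spec_solution spell dic (solution spell dic)

-- ===== LEMMAS AND PROOFS =====

-- the remove-fold is List.diff
theorem pvRemoveFold_eq_diff (d wl : List String) :
    d.foldl (fun acc s => (PySem.List.remove? acc s).getD acc) wl = wl.diff d := by
  induction d generalizing wl with
  | nil => simp [List.diff]
  | cons s d ih =>
    have hstep : (PySem.List.remove? wl s).getD wl = wl.erase s := by
      by_cases h : s ∈ wl
      · rw [PySem.List.remove?_eq_some_erase wl s h]; rfl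
      · rw [(PySem.List.remove?_eq_none_iff wl s).2 h, List.erase_of_not_mem h]; rfl
    simp [List.foldl, hstep, ih, List.diff_cons]

-- the leftover-rescan loop returns true iff the leftover list is empty
theorem pvCondLoop_eq_isEmpty (wl : List String) (wset : PySem.Set String)
    (h : ∀ s ∈ wl, s ∈ wset) : pvCondLoop wl wset = wl.isEmpty := by
  cases wl with
  | nil => rfl
  | cons s rest => simp [pvCondLoop, h s (by simp)]

theorem pvKnowLoop_eq_all (sp : List String) (wset : PySem.Set String) :
    pvKnowLoop sp wset = sp.all (fun s => decide (s ∈ wset)) := by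
  induction sp with
  | nil => rfl
  | cons s rest ih => by_cases h : s ∈ wset <;> simp [pvKnowLoop, h, ih]

-- diff by the distinct-element list is empty iff the list has no duplicates
theorem diff_ofList_eq_nil_iff (wl : List String) :
    wl.diff (PySem.Set.ofList wl) = [] ↔ wl.Nodup := by
  rw [List.nodup_iff_count_le_one]
  constructor
  · intro h a
    by_cases ha : a ∈ wl
    · have hc : List.count a (wl.diff (PySem.Set.ofList wl)) = 0 := by rw [h]; simp
      rw [List.count_diff,
        List.count_eq_one_of_mem (PySem.Set.nodup_ofList wl) ((PySem.Set.mem_ofList wl a).2 ha)] at hc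
      omega
    · rw [List.count_eq_zero_of_not_mem ha]; omega
  · intro h
    rcases hne : wl.diff (PySem.Set.ofList wl) with _ | ⟨a, t⟩
    · rfl
    · exfalso
      have ha : a ∈ wl.diff (PySem.Set.ofList wl) := by rw [hne]; simp
      have hpos : 0 < List.count a (wl.diff (PySem.Set.ofList wl)) := List.count_pos_iff.2 ha
      have hmem : a ∈ wl := List.diff_subset wl (PySem.Set.ofList wl) ha
      rw [List.count_diff,
        List.count_eq_one_of_mem (PySem.Set.nodup_ofList wl) ((PySem.Set.mem_ofList wl a).2 hmem)] at hpos
      have := h a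
      omega

-- nodup iff same length as its set of distinct elements
theorem nodup_iff_length_eq_ofList_length (wl : List String) :
    wl.Nodup ↔ wl.length = (PySem.Set.ofList wl : List String).length := by
  constructor
  · intro h
    have hfs : (PySem.Set.ofList wl : List String).toFinset = wl.toFinset := by
      ext a; simp [PySem.Set.mem_ofList]
    rw [← List.toFinset_card_of_nodup h, ← List.toFinset_card_of_nodup (PySem.Set.nodup_ofList wl), hfs]
  · intro h
    have hsub : (PySem.Set.ofList wl : List String) ⊆ wl := fun a ha => (PySem.Set.mem_ofList wl a).1 ha
    have hperm := ((PySem.Set.nodup_ofList wl).subperm hsub).perm_of_length_le (le_of_eq h)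
    exact hperm.nodup (PySem.Set.nodup_ofList wl)

-- A's duplicate-detection machinery for one word = B's length test
theorem condPart (word : String) :
    pvCondLoop ((PySem.Set.ofList (pvChars word) : List String).foldl
        (fun acc s => (PySem.List.remove? acc s).getD acc) (pvChars word)) (PySem.Set.ofList (pvChars word))
      = (PySem.Str.len word == PySem.Set.len (PySem.Set.ofList (pvChars word))) := by
  rw [pvRemoveFold_eq_diff, pvCondLoop_eq_isEmpty _ _
    (fun s hs => (PySem.Set.mem_ofList (pvChars word) s).2
      (List.diff_subset (pvChars word) (PySem.Set.ofList (pvChars word)) hs))]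
  have hlen : (pvChars word).length = word.toList.length := by simp [pvChars]
  rw [Bool.eq_iff_iff]
  simp only [List.isEmpty_iff, beq_iff_eq, PySem.Str.len, PySem.Set.len, Int.natCast_inj]
  rw [diff_ofList_eq_nil_iff, nodup_iff_length_eq_ofList_length, hlen]

-- A's membership loop over spell = B's subset test
theorem knowPart (spell : List String) (wset : PySem.Set String) :
    pvKnowLoop spell wset = PySem.Set.issubset (PySem.Set.ofList spell) wset := by
  rw [pvKnowLoop_eq_all, Bool.eq_iff_iff]
  simp [PySem.Set.issubset, List.all_eq_true, PySem.Set.mem_ofList]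

theorem ifStep (c k : Bool) (t : Int) :
    (if c then if k then (1 : Int) else t else t) = (if c && k then 1 else t) := by
  cases c <;> cases k <;> simp

theorem solution_spec' (spell dic : List String) : solution spell dic = solution_alt spell dic := by
  unfold solution solution_alt
  induction dic with
  | nil => rfl
  | cons word rest ih =>
    simp only [pvSolLoop, pvAltLoop]
    rw [ih, ifStep, condPart, knowPart]

-- ===== VERDICT (by name: the statement is the Claim_ definition above) =====
theorem solution_spec : Claim_equal_solution := by
  intro spell dic _
  unfold Spec_solution
  exact solution_spec' spell dic
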